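-- pv_equiv track=rewrite | github.com/Koozzi/Algorithms | BJ/implementation/G4_16235_20210123.py | spring_summer
-- ===== SOURCE A (Python) =====
-- def spring_summer(N, tree_info, board):
--     dead_tree = []
--     for i in range(N):
--         for j in range(N):
--             if tree_info[i][j]:
--                 tree_info[i][j].sort()
--                 for k in range(len(tree_info[i][j])):
--                     if tree_info[i][j][k] <= board[i][j]:
--                         board[i][j] -= tree_info[i][j][k]
--                         tree_info[i][j][k] += 1
--                     else:
--                         dead_tree.append([i,j,tree_info[i][j][k]])
--                         tree_info[i][j][k] = 0
--
--                 for k in range(len(tree_info[i][j]) - 1, -1, -1):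
--                     if tree_info[i][j][k] == 0:
--                         tree_info[i][j].pop()
--                     else: break
--
--     for tree in dead_tree:
--         board[tree[0]][tree[1]] += tree[2] // 2
--
--     return board
-- ===== SOURCE B (Python) =====
-- def spring_summer(N, tree_info, board):
--     # Per cell: the survivors of the youngest-first feed are exactly a prefix of
--     # the sorted ages (once one tree starves, every older one does), so locate
--     # the cut by binary search over the running maximum of the prefix sums and
--     # rebuild the cell's list and the board value arithmetically from the cut.
--     for i in range(N):
--         for j in range(N):
--             ages = sorted(tree_info[i][j])
--             b = board[i][j]
--             pre = [0]
--             for a in ages: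
--                 pre.append(pre[-1] + a)
--             rm = []
--             for s in pre[1:]:
--                 rm.append(s if not rm or s > rm[-1] else rm[-1])
--             lo, hi = 0, len(ages)
--             while lo < hi:
--                 mid = (lo + hi + 1) // 2
--                 if rm[mid - 1] <= b:
--                     lo = mid
--                 else:
--                     hi = mid - 1
--             m = lo
--             tree_info[i][j] = [a + 1 for a in ages[:m]]
--             board[i][j] = b - pre[m] + sum(a // 2 for a in ages[m:])
--     return board
-- ===== Notes on version B (the rewrite author's own statement) =====
-- stated objective: alternative
-- what changed: B exploits that with sorted ages the survivors are exactly a prefix (once one tree starves, every older one does), so per cell it builds prefix sums and their running maxima, binary-searches the cut index, and rebuilds the cell list and board value arithmetically from the cut, instead of simulating the feed with zero sentinels, a global dead list, a trailing pop loop and a second pass.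
import Mathlib
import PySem

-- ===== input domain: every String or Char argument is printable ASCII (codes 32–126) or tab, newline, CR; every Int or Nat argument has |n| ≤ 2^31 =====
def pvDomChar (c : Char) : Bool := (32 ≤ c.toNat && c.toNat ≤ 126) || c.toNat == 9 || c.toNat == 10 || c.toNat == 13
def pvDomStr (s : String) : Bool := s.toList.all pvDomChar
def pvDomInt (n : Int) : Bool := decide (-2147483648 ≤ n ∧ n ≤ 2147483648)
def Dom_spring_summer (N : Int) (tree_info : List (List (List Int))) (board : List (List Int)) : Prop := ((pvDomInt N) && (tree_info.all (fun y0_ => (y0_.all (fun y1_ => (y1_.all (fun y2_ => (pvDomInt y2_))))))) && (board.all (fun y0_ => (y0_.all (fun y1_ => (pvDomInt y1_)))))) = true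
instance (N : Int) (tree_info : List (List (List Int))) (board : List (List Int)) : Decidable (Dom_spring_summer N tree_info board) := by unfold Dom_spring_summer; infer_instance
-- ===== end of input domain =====

-- B replaces A's feed simulation (zero sentinels, global dead list, trailing-pop loop, second
-- pass) by a per-cell prefix cut found by binary search on running maxima of prefix sums;
-- equivalence is about the RETURN value only (both mutate board identically; tree_info is
-- mutated differently and is not returned).

-- ===== PORT A =====
-- shared 2-d access helpers (read/write board[i][j], tree_info[i][j])
def pvGet2 (bd : List (List Int)) (i j : Nat) : Int := (bd.getD i []).getD j 0
def pvSet2 (bd : List (List Int)) (i j : Nat) (v : Int) : List (List Int) :=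
  bd.set i ((bd.getD i []).set j v)
def pvGetCell (ti : List (List (List Int))) (i j : Nat) : List Int := (ti.getD i []).getD j []
def pvSetCell (ti : List (List (List Int))) (i j : Nat) (c : List Int) : List (List (List Int)) :=
  ti.set i ((ti.getD i []).set j c)

-- one iteration of A's feed loop: k-th tree feeds or dies (0-sentinel + dead_tree entry)
def pvFeedStep (i j : Nat) (s : List Int × Int × List (List Int)) (k : Nat) :
    List Int × Int × List (List Int) :=
  let a := s.1.getD k 0
  if a ≤ s.2.1 then (s.1.set k (a + 1), s.2.1 - a, s.2.2)
  else (s.1.set k 0, s.2.1, s.2.2 ++ [[(i : Int), (j : Int), a]])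

-- A's trailing-zero pop loop: k runs len-1,…,0 and tree_info[i][j][k] is always the
-- current LAST element (each pop shortens the list in step with k), break on nonzero
def pvPop : List Int → Nat → List Int
  | c, 0 => c
  | c, k + 1 => if c.getLast? = some 0 then pvPop c.dropLast k else c

-- A's body for one cell (i, j): state is (tree_info, board, dead_tree)
def pvACellStep (s : List (List (List Int)) × List (List Int) × List (List Int))
    (i j : Nat) : List (List (List Int)) × List (List Int) × List (List Int) :=
  let cell := pvGetCell s.1 i j
  if cell ≠ [] then
    let ages := PySem.List.sorted cell (fun x => x)
    let r := (List.range ages.length).foldl (pvFeedStep i j) (ages, pvGet2 s.2.1 i j, s.2.2)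
    (pvSetCell s.1 i j (pvPop r.1 r.1.length), pvSet2 s.2.1 i j r.2.1, r.2.2)
  else s

-- final loop: board[tree[0]][tree[1]] += tree[2] // 2 (coords come from range(N), so ≥ 0
-- and .toNat is exact here)
def pvApplyStep (bd : List (List Int)) (t : List Int) : List (List Int) :=
  pvSet2 bd (t.getD 0 0).toNat (t.getD 1 0).toNat
    (pvGet2 bd (t.getD 0 0).toNat (t.getD 1 0).toNat + PySem.Int.floordiv (t.getD 2 0) 2)

def spring_summer (N : Int) (tree_info : List (List (List Int))) (board : List (List Int)) :
    List (List Int) :=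
  let s := (List.range N.toNat).foldl
    (fun s i => (List.range N.toNat).foldl (fun s j => pvACellStep s i j) s)
    (tree_info, board, ([] : List (List Int)))
  s.2.2.foldl pvApplyStep s.2.1

-- ===== PORT B =====
-- Source B's while-loop binary search: largest m in [lo, hi] whose running-max entry fits
-- (rm[mid-1] is in range whenever the loop reads it; getD transcribes the plain index;
-- the fuel hi - lo only makes the loop total: each iteration shrinks hi - lo by ≥ 1)
def pvBSF : Nat → List Int → Int → Nat → Nat → Nat
  | 0, _, _, lo, _ => lo
  | fuel + 1, rm, b, lo, hi =>
    if lo < hi then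
      let mid := (lo + hi + 1) / 2
      if rm.getD (mid - 1) 0 ≤ b then pvBSF fuel rm b mid hi
      else pvBSF fuel rm b lo (mid - 1)
    else lo

def pvBS (rm : List Int) (b : Int) (lo hi : Nat) : Nat := pvBSF (hi - lo) rm b lo hi

-- B's body for one cell (i, j): sort, prefix sums, running max, binary-search the cut,
-- rebuild cell and board value from the cut; state is (tree_info, board)
def pvBCellStep (s : List (List (List Int)) × List (List Int)) (i j : Nat) :
    List (List (List Int)) × List (List Int) :=
  let ages := PySem.List.sorted (pvGetCell s.1 i j) (fun x => x)
  let b := pvGet2 s.2 i j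
  let pre := ages.foldl (fun p a => p ++ [p.getLastD 0 + a]) [(0 : Int)]
  let rm := (pre.drop 1).foldl
    (fun r v => r ++ [if r = [] ∨ r.getLastD 0 < v then v else r.getLastD 0]) ([] : List Int)
  let m := pvBS rm b 0 ages.length
  (pvSetCell s.1 i j ((ages.take m).map (· + 1)),
   pvSet2 s.2 i j (b - pre.getD m 0 + ((ages.drop m).map (fun a => PySem.Int.floordiv a 2)).sum))

def spring_summer_alt (N : Int) (tree_info : List (List (List Int))) (board : List (List Int)) :
    List (List Int) :=
  ((List.range N.toNat).foldl
    (fun s i => (List.range N.toNat).foldl (fun s j => pvBCellStep s i j) s)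
    (tree_info, board)).2

-- ===== PRECONDITION & SPEC =====
-- Pre_ excludes exactly the inputs on which Python A raises IndexError: tree_info or board
-- (or one of their first N rows) shorter than N.
def Pre_spring_summer (N : Int) (tree_info : List (List (List Int))) (board : List (List Int)) : Prop :=
  N.toNat ≤ tree_info.length ∧ N.toNat ≤ board.length ∧
  (∀ r ∈ tree_info.take N.toNat, N.toNat ≤ r.length) ∧
  (∀ r ∈ board.take N.toNat, N.toNat ≤ r.length)
instance (N : Int) (tree_info : List (List (List Int))) (board : List (List Int)) : Decidable (Pre_spring_summer N tree_info board) := by unfold Pre_spring_summer; infer_instance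

def pvWitness_spring_summer : Int × List (List (List Int)) × List (List Int) :=
  (2, [[[1], [2]], [[], [3, 1]]], [[5, 3], [2, 4]])

def Spec_spring_summer (N : Int) (tree_info : List (List (List Int))) (board : List (List Int)) (out : List (List Int)) : Prop := out = spring_summer_alt N tree_info board
instance (N : Int) (tree_info : List (List (List Int))) (board : List (List Int)) (out : List (List Int)) : Decidable (Spec_spring_summer N tree_info board out) := by unfold Spec_spring_summer; infer_instance

-- ===== CLAIM (what is proved, stated in full; the proofs are below) =====
def Claim_equal_spring_summer : Prop := ∀ (N : Int) (tree_info : List (List (List Int))) (board : List (List Int)), Dom_spring_summer N tree_info board → Pre_spring_summer N tree_info board → Spec_spring_summer N tree_info board (spring_summer N tree_info board)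

-- ===== LEMMAS AND PROOFS =====

theorem pvGet2_set2_same (bd : List (List Int)) (i j : Nat) (v : Int)
    (hi : i < bd.length) (hj : j < (bd.getD i []).length) :
    pvGet2 (pvSet2 bd i j v) i j = v := by
  have hj' : j < bd[i].length := by simpa [List.getD_eq_getElem?_getD, hi] using hj
  simp [pvGet2, pvSet2, List.getD_eq_getElem?_getD, hi, hj', List.getElem?_set_self]

theorem pvGet2_set2_ne (bd : List (List Int)) (i j i' j' : Nat) (v : Int)
    (h : (i, j) ≠ (i', j')) : pvGet2 (pvSet2 bd i j v) i' j' = pvGet2 bd i' j' := by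
  by_cases hii : i = i'
  · subst hii
    have hjj : j ≠ j' := by simpa using h
    by_cases hlen : i < bd.length
    · simp [pvGet2, pvSet2, List.getD_eq_getElem?_getD, hlen, List.getElem?_set, hjj]
    · simp [pvGet2, pvSet2, List.getD_eq_getElem?_getD, List.getElem?_set,
        Nat.lt_irrefl, hlen]
  · simp [pvGet2, pvSet2, List.getD_eq_getElem?_getD, List.getElem?_set, hii]

theorem pvSet2_set2_same (bd : List (List Int)) (i j : Nat) (v w : Int) :
    pvSet2 (pvSet2 bd i j v) i j w = pvSet2 bd i j w := by
  by_cases hlen : i < bd.length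
  · simp [pvSet2, List.getD_eq_getElem?_getD, hlen, List.getElem?_set, List.set_set]
  · simp [pvSet2, List.getD_eq_getElem?_getD, List.getElem?_set, hlen, List.set_set]

theorem pvSet2_comm (bd : List (List Int)) (i j i' j' : Nat) (v w : Int)
    (h : (i, j) ≠ (i', j')) :
    pvSet2 (pvSet2 bd i j v) i' j' w = pvSet2 (pvSet2 bd i' j' w) i j v := by
  by_cases hii : i = i'
  · subst hii
    have hjj : j ≠ j' := by simpa using h
    by_cases hlen : i < bd.length
    · simp [pvSet2, List.getD_eq_getElem?_getD, hlen, List.getElem?_set, List.set_set,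
        List.set_comm _ _ hjj]
    · simp [pvSet2, List.getD_eq_getElem?_getD, List.getElem?_set, hlen, List.set_set,
        List.set_comm _ _ hjj]
  · simp [pvSet2, List.getD_eq_getElem?_getD, List.getElem?_set, hii, Ne.symm hii,
      List.set_comm _ _ hii]

theorem pvSet2_self (bd : List (List Int)) (i j : Nat)
    (hi : i < bd.length) (hj : j < (bd.getD i []).length) :
    pvSet2 bd i j (pvGet2 bd i j) = bd := by
  have hj' : j < bd[i].length := by simpa [List.getD_eq_getElem?_getD, hi] using hj
  simp [pvSet2, pvGet2, List.getD_eq_getElem?_getD, hi, hj', List.set_getElem_self]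

theorem pvSet2_length (bd : List (List Int)) (i j : Nat) (v : Int) :
    (pvSet2 bd i j v).length = bd.length := by simp [pvSet2]

theorem pvSet2_row_length (bd : List (List Int)) (i j i' : Nat) (v : Int) :
    ((pvSet2 bd i j v).getD i' []).length = (bd.getD i' []).length := by
  by_cases hii : i = i'
  · subst hii
    by_cases hlen : i < bd.length
    · simp [pvSet2, List.getD_eq_getElem?_getD, hlen]
    · simp [pvSet2, List.getD_eq_getElem?_getD, List.getElem?_set, hlen]
  · simp [pvSet2, List.getD_eq_getElem?_getD, List.getElem?_set, hii]

def pvDead : List Int → Int → List Int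
  | [], _ => []
  | a :: r, b => if a ≤ b then pvDead r (b - a) else a :: pvDead r b

def pvBFin : List Int → Int → Int
  | [], b => b
  | a :: r, b => if a ≤ b then pvBFin r (b - a) else pvBFin r b

def pvSurv : List Int → Int → List Int
  | [], _ => []
  | a :: r, b => if a ≤ b then (a + 1) :: pvSurv r (b - a) else pvSurv r b

def pvUpd : List Int → Int → List Int
  | [], _ => []
  | a :: r, b => if a ≤ b then (a + 1) :: pvUpd r (b - a) else 0 :: pvUpd r b

def pvHalfSum (ds : List Int) : Int := (ds.map (fun a => PySem.Int.floordiv a 2)).sum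

theorem pvFeedA_char (i j : Nat) : ∀ (ages pre : List Int) (b : Int) (d : List (List Int)),
    (List.range' pre.length ages.length).foldl (pvFeedStep i j) (pre ++ ages, b, d) =
      (pre ++ pvUpd ages b, pvBFin ages b,
        d ++ (pvDead ages b).map (fun a => [(i : Int), (j : Int), a])) := by
  intro ages
  induction ages with
  | nil => intro pre b d; simp [pvUpd, pvBFin, pvDead]
  | cons a r ih =>
    intro pre b d
    simp only [List.length_cons]
    rw [List.range'_succ, List.foldl_cons]
    have hstep : pvFeedStep i j (pre ++ a :: r, b, d) pre.length =
        (if a ≤ b then ((pre ++ (a+1) :: r), b - a, d)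
         else ((pre ++ 0 :: r), b, d ++ [[(i : Int), (j : Int), a]])) := by
      simp [pvFeedStep]
    rw [hstep]
    by_cases hab : a ≤ b
    · simp only [if_pos hab]
      have := ih (pre ++ [a+1]) (b - a) d
      simp only [List.length_append, List.length_cons, List.length_nil] at this ⊢
      simpa [pvUpd, pvBFin, pvDead, hab, List.append_assoc] using this
    · simp only [if_neg hab]
      have := ih (pre ++ [0]) b (d ++ [[(i : Int), (j : Int), a]])
      simp only [List.length_append, List.length_cons, List.length_nil] at this ⊢
      simpa [pvUpd, pvBFin, pvDead, hab, List.append_assoc] using this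

-- ----- B-side characterisation: prefix sums, running max, binary search, and the cut -----

-- greedy cut: how many of the ages (in order) the budget feeds
def pvCnt : List Int → Int → Nat
  | [], _ => 0
  | a :: r, b => if a ≤ b then pvCnt r (b - a) + 1 else 0

-- pvScan l c = partial sums of l starting from c (c excluded)
def pvScan : List Int → Int → List Int
  | [], _ => []
  | a :: r, c => (c + a) :: pvScan r (c + a)

-- running max of (x :: t) seeded with current max M
def pvRmx : List Int → Int → List Int
  | [], _ => []
  | x :: t, M => (if M < x then x else M) :: pvRmx t (if M < x then x else M)

def pvRm : List Int → List Int
  | [] => []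
  | x :: t => x :: pvRmx t x

theorem pvPreFold : ∀ (l acc : List Int),
    l.foldl (fun p a => p ++ [p.getLastD 0 + a]) acc = acc ++ pvScan l (acc.getLastD 0) := by
  intro l
  induction l with
  | nil => intro acc; simp [pvScan]
  | cons a r ih =>
    intro acc
    rw [List.foldl_cons, ih]
    simp [pvScan, List.getLastD_concat, List.append_assoc]

theorem pvRmFold : ∀ (l acc : List Int), acc ≠ [] →
    l.foldl (fun r v => r ++ [if r = [] ∨ r.getLastD 0 < v then v else r.getLastD 0]) acc =
      acc ++ pvRmx l (acc.getLastD 0) := by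
  intro l
  induction l with
  | nil => intro acc _; simp [pvRmx]
  | cons x t ih =>
    intro acc hne
    rw [List.foldl_cons]
    have hcond : (if acc = [] ∨ acc.getLastD 0 < x then x else acc.getLastD 0) =
        (if acc.getLastD 0 < x then x else acc.getLastD 0) := by
      simp [hne]
    rw [hcond, ih _ (by simp)]
    simp [pvRmx, List.getLastD_concat, List.append_assoc]

theorem pvRmFoldTop : ∀ (l : List Int),
    l.foldl (fun r v => r ++ [if r = [] ∨ r.getLastD 0 < v then v else r.getLastD 0])
      ([] : List Int) = pvRm l := by
  intro l
  cases l with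
  | nil => rfl
  | cons x t =>
    rw [List.foldl_cons]
    have h1 : (([] : List Int) ++ [if ([] : List Int) = [] ∨ ([] : List Int).getLastD 0 < x
        then x else ([] : List Int).getLastD 0]) = [x] := by simp
    rw [h1, pvRmFold t [x] (by simp)]
    simp [pvRm, List.getLastD]

theorem pvScan_length : ∀ (l : List Int) (c : Int), (pvScan l c).length = l.length := by
  intro l
  induction l with
  | nil => intro c; rfl
  | cons a r ih => intro c; simp [pvScan, ih]

theorem pvScan_getD : ∀ (l : List Int) (c : Int) (k : Nat), k < l.length →
    (pvScan l c).getD k 0 = c + (l.take (k + 1)).sum := by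
  intro l
  induction l with
  | nil => intro c k h; simp at h
  | cons a r ih =>
    intro c k h
    cases k with
    | zero => simp [pvScan]
    | succ k =>
      simp only [pvScan, List.getD_cons_succ]
      rw [ih (c + a) k (by simpa using h)]
      simp [List.take_succ_cons]
      ring

theorem pvRmx_getD_le : ∀ (t : List Int) (M b : Int) (j : Nat), j < t.length →
    ((pvRmx t M).getD j 0 ≤ b ↔ M ≤ b ∧ ∀ i ≤ j, t.getD i 0 ≤ b) := by
  intro t
  induction t with
  | nil => intro M b j h; simp at h
  | cons x s ih =>
    intro M b j h
    cases j with
    | zero =>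
      constructor
      · intro hle
        by_cases hMx : M < x
        · simp [pvRmx, hMx] at hle
          exact ⟨le_of_lt (lt_of_lt_of_le hMx hle), fun i hi => by
            interval_cases i; simpa using hle⟩
        · simp [pvRmx, hMx] at hle
          exact ⟨hle, fun i hi => by
            interval_cases i; simp; omega⟩
      · rintro ⟨hM, hall⟩
        have hx : x ≤ b := by simpa using hall 0 (le_refl 0)
        by_cases hMx : M < x <;> simp [pvRmx, hMx] <;> omega
    | succ j =>
      simp only [pvRmx, List.getD_cons_succ]
      rw [ih _ b j (by simpa using h)]
      constructor
      · rintro ⟨hM', hall⟩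
        have hM : M ≤ b := by by_cases hMx : M < x <;> simp [hMx] at hM' <;> omega
        have hx : x ≤ b := by by_cases hMx : M < x <;> simp [hMx] at hM' <;> omega
        refine ⟨hM, fun i hi => ?_⟩
        cases i with
        | zero => simpa using hx
        | succ i => simpa using hall i (by omega)
      · rintro ⟨hM, hall⟩
        have hx : x ≤ b := by simpa using hall 0 (by omega)
        refine ⟨by by_cases hMx : M < x <;> simp [hMx] <;> omega, fun i hi => ?_⟩
        simpa using hall (i + 1) (by omega)

theorem pvRm_getD_le (l : List Int) (b : Int) (j : Nat) (h : j < l.length) :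
    ((pvRm l).getD j 0 ≤ b ↔ ∀ i ≤ j, l.getD i 0 ≤ b) := by
  cases l with
  | nil => simp at h
  | cons x t =>
    cases j with
    | zero =>
      constructor
      · intro hle i hi; interval_cases i; simpa [pvRm] using hle
      · intro hall; simpa [pvRm] using hall 0 (le_refl 0)
    | succ j =>
      simp only [pvRm, List.getD_cons_succ]
      rw [pvRmx_getD_le t x b j (by simpa using h)]
      constructor
      · rintro ⟨hx, hall⟩ i hi
        cases i with
        | zero => simpa using hx
        | succ i => simpa using hall i (by omega)
      · intro hall
        exact ⟨by simpa using hall 0 (by omega), fun i hi => by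
          simpa using hall (i + 1) (by omega)⟩

-- the prefix-feasibility condition is exactly "k ≤ greedy cut" (no sortedness needed)
theorem pvCnt_iff : ∀ (l : List Int) (b : Int) (k : Nat), 1 ≤ k → k ≤ l.length →
    ((∀ i, 1 ≤ i → i ≤ k → (l.take i).sum ≤ b) ↔ k ≤ pvCnt l b) := by
  intro l
  induction l with
  | nil => intro b k h1 h2; simp at h2; omega
  | cons a r ih =>
    intro b k h1 h2
    simp only [List.length_cons] at h2
    constructor
    · intro hall
      have ha : a ≤ b := by
        have h := hall 1 (le_refl 1) h1
        rw [List.take_succ_cons, List.take_zero] at h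
        simpa using h
      simp only [pvCnt, if_pos ha]
      rcases Nat.eq_or_lt_of_le h1 with h | h
      · omega
      · have : k - 1 ≤ pvCnt r (b - a) := by
          rw [← ih (b - a) (k - 1) (by omega) (by omega)]
          intro i hi1 hi2
          have h' := hall (i + 1) (by omega) (by omega)
          rw [List.take_succ_cons, List.sum_cons] at h'
          omega
        omega
    · intro hk i hi1 hi2
      have ha : a ≤ b := by
        by_contra hab
        simp [pvCnt, hab] at hk
        omega
      simp only [pvCnt, if_pos ha] at hk
      cases i with
      | zero => omega
      | succ i =>
        cases Nat.eq_zero_or_pos i with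
        | inl h0 => subst h0; simpa using ha
        | inr hpos =>
          have hi' : i ≤ pvCnt r (b - a) := by omega
          have h' := (ih (b - a) i hpos (by omega)).mpr hi' i (by omega) (le_refl i)
          rw [List.take_succ_cons, List.sum_cons]
          omega

theorem pvCnt_le_length : ∀ (l : List Int) (b : Int), pvCnt l b ≤ l.length := by
  intro l
  induction l with
  | nil => intro b; simp [pvCnt]
  | cons a r ih =>
    intro b
    by_cases hab : a ≤ b <;> simp [pvCnt, hab]
    exact ih (b - a)

-- the binary search finds m when "fits ↔ ≤ m" holds on the live range
theorem pvBSF_eq (rm : List Int) (b : Int) (m : Nat) :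
    ∀ (n lo hi : Nat), hi - lo ≤ n → lo ≤ m → m ≤ hi →
    (∀ k, lo < k → k ≤ hi → (rm.getD (k - 1) 0 ≤ b ↔ k ≤ m)) →
    pvBSF n rm b lo hi = m := by
  intro n
  induction n with
  | zero =>
    intro lo hi hfuel hlo hhi _
    simp only [pvBSF]
    omega
  | succ n ih =>
    intro lo hi hfuel hlo hhi hiff
    simp only [pvBSF]
    by_cases hlt : lo < hi
    · simp only [if_pos hlt]
      have hmid1 : lo < (lo + hi + 1) / 2 := by omega
      have hmid2 : (lo + hi + 1) / 2 ≤ hi := by omega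
      by_cases hc : rm.getD ((lo + hi + 1) / 2 - 1) 0 ≤ b
      · simp only [if_pos hc]
        have hm : (lo + hi + 1) / 2 ≤ m := (hiff _ hmid1 hmid2).mp hc
        exact ih _ hi (by omega) hm hhi (fun k h1 h2 => hiff k (by omega) h2)
      · simp only [if_neg hc]
        have hm : m < (lo + hi + 1) / 2 := by
          by_contra hge
          exact hc ((hiff _ hmid1 hmid2).mpr (by omega))
        exact ih lo _ (by omega) hlo (by omega) (fun k h1 h2 => hiff k h1 (by omega))
    · simp only [if_neg hlt]; omega

theorem pvBS_eq (rm : List Int) (b : Int) (m : Nat) (lo hi : Nat) (hlo : lo ≤ m)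
    (hhi : m ≤ hi) (hiff : ∀ k, lo < k → k ≤ hi → (rm.getD (k - 1) 0 ≤ b ↔ k ≤ m)) :
    pvBS rm b lo hi = m :=
  pvBSF_eq rm b m (hi - lo) lo hi (le_refl _) hlo hhi hiff

-- sorted-tail facts: after a starvation everything starves
theorem pvSurv_nil : ∀ (l : List Int) (b : Int), (∀ x ∈ l, b < x) → pvSurv l b = [] := by
  intro l
  induction l with
  | nil => intro b _; rfl
  | cons a r ih =>
    intro b h
    have : ¬ a ≤ b := by have := h a (by simp); omega
    simp [pvSurv, this]
    exact ih b (fun x hx => h x (by simp [hx]))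

theorem pvDead_all : ∀ (l : List Int) (b : Int), (∀ x ∈ l, b < x) → pvDead l b = l := by
  intro l
  induction l with
  | nil => intro b _; rfl
  | cons a r ih =>
    intro b h
    have : ¬ a ≤ b := by have := h a (by simp); omega
    simp [pvDead, this]
    exact ih b (fun x hx => h x (by simp [hx]))

theorem pvBFin_id : ∀ (l : List Int) (b : Int), (∀ x ∈ l, b < x) → pvBFin l b = b := by
  intro l
  induction l with
  | nil => intro b _; rfl
  | cons a r ih =>
    intro b h
    have : ¬ a ≤ b := by have := h a (by simp); omega
    simp [pvBFin, this]
    exact ih b (fun x hx => h x (by simp [hx]))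

theorem pvSurv_take : ∀ (l : List Int), l.Pairwise (· ≤ ·) → ∀ (b : Int),
    pvSurv l b = (l.take (pvCnt l b)).map (· + 1) := by
  intro l
  induction l with
  | nil => intro _ b; rfl
  | cons a r ih =>
    intro hs b
    by_cases hab : a ≤ b
    · simp [pvSurv, pvCnt, hab, List.take_succ_cons, ih (List.Pairwise.of_cons hs) (b - a)]
    · simp [pvSurv, pvCnt, hab]
      exact pvSurv_nil r b (fun x hx => by
        have := (List.pairwise_cons.mp hs).1 x hx; omega)

theorem pvDead_drop : ∀ (l : List Int), l.Pairwise (· ≤ ·) → ∀ (b : Int),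
    pvDead l b = l.drop (pvCnt l b) := by
  intro l
  induction l with
  | nil => intro _ b; rfl
  | cons a r ih =>
    intro hs b
    by_cases hab : a ≤ b
    · simp [pvDead, pvCnt, hab, ih (List.Pairwise.of_cons hs) (b - a)]
    · simp [pvDead, pvCnt, hab]
      exact pvDead_all r b (fun x hx => by
        have := (List.pairwise_cons.mp hs).1 x hx; omega)

theorem pvBFin_sub : ∀ (l : List Int), l.Pairwise (· ≤ ·) → ∀ (b : Int),
    pvBFin l b = b - (l.take (pvCnt l b)).sum := by
  intro l
  induction l with
  | nil => intro _ b; simp [pvBFin, pvCnt]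
  | cons a r ih =>
    intro hs b
    by_cases hab : a ≤ b
    · simp [pvBFin, pvCnt, hab, List.take_succ_cons, ih (List.Pairwise.of_cons hs) (b - a)]
      ring
    · simp [pvBFin, pvCnt, hab]
      exact pvBFin_id r b (fun x hx => by
        have := (List.pairwise_cons.mp hs).1 x hx; omega)

-- the whole B cell pipeline computes (pvSurv, pvBFin + halved dead sum)
theorem pvBCell_core (ages : List Int) (hs : ages.Pairwise (· ≤ ·)) (b : Int) :
    ((ages.take (pvBS ((( (ages.foldl (fun p a => p ++ [p.getLastD 0 + a]) [(0 : Int)]).drop 1).foldl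
        (fun r v => r ++ [if r = [] ∨ r.getLastD 0 < v then v else r.getLastD 0]) ([] : List Int)))
        b 0 ages.length)).map (· + 1) = pvSurv ages b) ∧
    (b - (ages.foldl (fun p a => p ++ [p.getLastD 0 + a]) [(0 : Int)]).getD
        (pvBS ((( (ages.foldl (fun p a => p ++ [p.getLastD 0 + a]) [(0 : Int)]).drop 1).foldl
        (fun r v => r ++ [if r = [] ∨ r.getLastD 0 < v then v else r.getLastD 0]) ([] : List Int)))
        b 0 ages.length) 0 +
      ((ages.drop (pvBS ((( (ages.foldl (fun p a => p ++ [p.getLastD 0 + a]) [(0 : Int)]).drop 1).foldl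
        (fun r v => r ++ [if r = [] ∨ r.getLastD 0 < v then v else r.getLastD 0]) ([] : List Int)))
        b 0 ages.length)).map (fun a => PySem.Int.floordiv a 2)).sum
      = pvBFin ages b + pvHalfSum (pvDead ages b)) := by
  have hpre : ages.foldl (fun p a => p ++ [p.getLastD 0 + a]) [(0 : Int)] =
      (0 : Int) :: pvScan ages 0 := by
    simpa using pvPreFold ages [(0 : Int)]
  have hrm : ((ages.foldl (fun p a => p ++ [p.getLastD 0 + a]) [(0 : Int)]).drop 1).foldl
      (fun r v => r ++ [if r = [] ∨ r.getLastD 0 < v then v else r.getLastD 0]) ([] : List Int) =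
      pvRm (pvScan ages 0) := by
    rw [hpre]; simpa using pvRmFoldTop (pvScan ages 0)
  have hbs : pvBS (pvRm (pvScan ages 0)) b 0 ages.length = pvCnt ages b := by
    apply pvBS_eq _ _ _ 0 ages.length (by omega) (pvCnt_le_length ages b)
    intro k h1 h2
    rw [pvRm_getD_le _ _ _ (by rw [pvScan_length]; omega)]
    have : (∀ i ≤ k - 1, (pvScan ages 0).getD i 0 ≤ b) ↔
        (∀ i, 1 ≤ i → i ≤ k → (ages.take i).sum ≤ b) := by
      constructor
      · intro h i hi1 hi2
        have := h (i - 1) (by omega)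
        rw [pvScan_getD ages 0 (i - 1) (by omega)] at this
        simpa [show i - 1 + 1 = i by omega] using this
      · intro h i hi
        rw [pvScan_getD ages 0 i (by omega)]
        simpa using h (i + 1) (by omega) (by omega)
    rw [this]
    exact pvCnt_iff ages b k (by omega) h2
  rw [hrm, hbs]
  have hgetD : ((0 : Int) :: pvScan ages 0).getD (pvCnt ages b) 0 =
      (ages.take (pvCnt ages b)).sum := by
    cases hc : pvCnt ages b with
    | zero => simp
    | succ m =>
      have hm : m < ages.length := by
        have := pvCnt_le_length ages b; omega
      simp only [List.getD_cons_succ]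
      rw [pvScan_getD ages 0 m (by omega)]
      simp
  constructor
  · exact (pvSurv_take ages hs b).symm
  · rw [hpre, hgetD, pvBFin_sub ages hs b, pvDead_drop ages hs b]
    simp [pvHalfSum]

theorem pvGetCell_setCell_ne (ti : List (List (List Int))) (i j i' j' : Nat) (c : List Int)
    (h : (i, j) ≠ (i', j')) : pvGetCell (pvSetCell ti i j c) i' j' = pvGetCell ti i' j' := by
  by_cases hii : i = i'
  · subst hii
    have hjj : j ≠ j' := by simpa using h
    by_cases hlen : i < ti.length
    · simp [pvGetCell, pvSetCell, List.getD_eq_getElem?_getD, hlen, hjj]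
    · simp [pvGetCell, pvSetCell, List.getD_eq_getElem?_getD, List.getElem?_set, hlen]
  · simp [pvGetCell, pvSetCell, List.getD_eq_getElem?_getD, List.getElem?_set, hii]

def pvCoord (t : List Int) : Nat × Nat := ((t.getD 0 0).toNat, (t.getD 1 0).toNat)

theorem pvApply_get2_ne (ds : List (List Int)) : ∀ (bd : List (List Int)) (i j : Nat),
    (∀ t ∈ ds, pvCoord t ≠ (i, j)) →
    pvGet2 (ds.foldl pvApplyStep bd) i j = pvGet2 bd i j := by
  induction ds with
  | nil => intro bd i j _; rfl
  | cons t r ih =>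
    intro bd i j h
    rw [List.foldl_cons, ih _ _ _ (fun t ht => h t (List.mem_cons_of_mem _ ht))]
    exact pvGet2_set2_ne _ _ _ _ _ _ (by simpa [pvCoord, Prod.ext_iff] using h t List.mem_cons_self)

theorem pvApply_set2_comm (ds : List (List Int)) : ∀ (bd : List (List Int)) (i j : Nat) (v : Int),
    (∀ t ∈ ds, pvCoord t ≠ (i, j)) →
    ds.foldl pvApplyStep (pvSet2 bd i j v) = pvSet2 (ds.foldl pvApplyStep bd) i j v := by
  induction ds with
  | nil => intro bd i j v _; rfl
  | cons t r ih =>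
    intro bd i j v h
    have hne : ((t.getD 0 0).toNat, (t.getD 1 0).toNat) ≠ (i, j) := by
      simpa [pvCoord] using h t List.mem_cons_self
    rw [List.foldl_cons, List.foldl_cons]
    have : pvApplyStep (pvSet2 bd i j v) t = pvSet2 (pvApplyStep bd t) i j v := by
      unfold pvApplyStep
      rw [pvGet2_set2_ne _ _ _ _ _ _ (Ne.symm hne)]
      exact pvSet2_comm _ _ _ _ _ _ _ (Ne.symm hne)
    rw [this, ih _ _ _ _ (fun t ht => h t (List.mem_cons_of_mem _ ht))]

theorem pvApply_length (ds : List (List Int)) : ∀ (bd : List (List Int)),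
    (ds.foldl pvApplyStep bd).length = bd.length := by
  induction ds with
  | nil => intro bd; rfl
  | cons t r ih => intro bd; rw [List.foldl_cons, ih]; simp [pvApplyStep, pvSet2]

theorem pvApply_row_length (ds : List (List Int)) : ∀ (bd : List (List Int)) (i' : Nat),
    ((ds.foldl pvApplyStep bd).getD i' []).length = (bd.getD i' []).length := by
  induction ds with
  | nil => intro bd i'; rfl
  | cons t r ih => intro bd i'; rw [List.foldl_cons, ih, pvApplyStep, pvSet2_row_length]

theorem pvApply_cell (ds : List Int) : ∀ (bd : List (List Int)) (i j : Nat),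
    i < bd.length → j < (bd.getD i []).length →
    (ds.map (fun a => [(i : Int), (j : Int), a])).foldl pvApplyStep bd =
      pvSet2 bd i j (pvGet2 bd i j + pvHalfSum ds) := by
  induction ds with
  | nil =>
    intro bd i j hi hj
    simp [pvHalfSum, pvSet2_self bd i j hi hj]
  | cons a r ih =>
    intro bd i j hi hj
    rw [List.map_cons, List.foldl_cons]
    have hstep : pvApplyStep bd [(i : Int), (j : Int), a] =
        pvSet2 bd i j (pvGet2 bd i j + PySem.Int.floordiv a 2) := by
      simp [pvApplyStep]
    rw [hstep]
    rw [ih _ i j (by rw [pvSet2_length]; exact hi) (by rw [pvSet2_row_length]; exact hj)]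
    rw [pvGet2_set2_same _ _ _ _ hi hj, pvSet2_set2_same]
    simp [pvHalfSum]
    ring_nf

theorem pvMain : ∀ (ps : List (Nat × Nat)) (tiA tiB : List (List (List Int)))
    (bd : List (List Int)) (dead : List (List Int)),
    ps.Pairwise (· ≠ ·) →
    (∀ p ∈ ps, p.1 < bd.length ∧ p.2 < (bd.getD p.1 []).length ∧
      pvGetCell tiA p.1 p.2 = pvGetCell tiB p.1 p.2) →
    (∀ t ∈ dead, pvCoord t ∉ ps) →
    (let r := ps.foldl (fun s p => pvACellStep s p.1 p.2) (tiA, bd, dead)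
     r.2.2.foldl pvApplyStep r.2.1) =
    (ps.foldl (fun s p => pvBCellStep s p.1 p.2) (tiB, dead.foldl pvApplyStep bd)).2 := by
  intro ps
  induction ps with
  | nil => intro tiA tiB bd dead _ _ _; rfl
  | cons p rest ih =>
    intro tiA tiB bd dead hp hr hd
    obtain ⟨i, j⟩ := p
    obtain ⟨h1, h2⟩ := List.pairwise_cons.mp hp
    obtain ⟨hi, hj, hcell⟩ := hr (i, j) List.mem_cons_self
    have hdij : ∀ t ∈ dead, pvCoord t ≠ (i, j) := fun t ht => by
      have := hd t ht; simp only [List.mem_cons] at this; tauto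
    have hdrest : ∀ t ∈ dead, pvCoord t ∉ rest := fun t ht => by
      have := hd t ht; simp only [List.mem_cons] at this; tauto
    set bdD := dead.foldl pvApplyStep bd with hbdD
    have hgD : pvGet2 bdD i j = pvGet2 bd i j := pvApply_get2_ne dead bd i j hdij
    have hiD : i < bdD.length := by rw [hbdD, pvApply_length]; exact hi
    have hjD : j < (bdD.getD i []).length := by rw [hbdD, pvApply_row_length]; exact hj
    simp only [List.foldl_cons]
    have hsorted : (PySem.List.sorted (pvGetCell tiB i j) (fun x => x)).Pairwise (· ≤ ·) := by
      simpa using PySem.List.sorted_pairwise (pvGetCell tiB i j) (fun x => x)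
    set ages := PySem.List.sorted (pvGetCell tiB i j) (fun x => x) with hages
    set g := pvGet2 bd i j with hg
    have hcore := pvBCell_core ages hsorted g
    have hB : pvBCellStep (tiB, bdD) i j =
        (pvSetCell tiB i j (pvSurv ages g),
         pvSet2 bdD i j (pvBFin ages g + pvHalfSum (pvDead ages g))) := by
      simp only [pvBCellStep, ← hages, hgD, ← hg]
      rw [hcore.1, hcore.2]
    by_cases hc : pvGetCell tiA i j = []
    · have hcB : pvGetCell tiB i j = [] := hcell ▸ hc
      have hagesnil : ages = [] := by rw [hages, hcB]; rfl
      have hA : pvACellStep (tiA, bd, dead) i j = (tiA, bd, dead) := by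
        simp [pvACellStep, hc]
      have hB' : pvBCellStep (tiB, bdD) i j = (pvSetCell tiB i j [], bdD) := by
        rw [hB, hagesnil]
        have hv : pvBFin ([] : List Int) g + pvHalfSum (pvDead ([] : List Int) g) = g := by
          simp [pvBFin, pvDead, pvHalfSum]
        rw [show pvSurv ([] : List Int) g = [] from rfl, hv, ← hgD,
          pvSet2_self bdD i j hiD hjD]
      rw [hA, hB']
      exact ih tiA (pvSetCell tiB i j []) bd dead h2
        (fun q hq => ⟨(hr q (List.mem_cons_of_mem _ hq)).1, (hr q (List.mem_cons_of_mem _ hq)).2.1,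
          by rw [(hr q (List.mem_cons_of_mem _ hq)).2.2,
            pvGetCell_setCell_ne _ _ _ _ _ _ (h1 q hq)]⟩)
        hdrest
    · set E := (pvDead ages g).map (fun a => [(i : Int), (j : Int), a]) with hE
      have hfeed : (List.range ages.length).foldl (pvFeedStep i j) (ages, g, dead) =
          (pvUpd ages g, pvBFin ages g, dead ++ E) := by
        have := pvFeedA_char i j ages [] g dead
        simpa [List.range_eq_range'] using this
      have hA : pvACellStep (tiA, bd, dead) i j =
          (pvSetCell tiA i j (pvPop (pvUpd ages g) (pvUpd ages g).length),
           pvSet2 bd i j (pvBFin ages g), dead ++ E) := by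
        simp only [pvACellStep, ← hg]
        rw [hcell, ← hages, hfeed]
        have hcB' : ¬ pvGetCell tiB i j = [] := fun h => hc (hcell.trans h)
        simp [hcB']
      rw [hA, hB]
      have happly : (dead ++ E).foldl pvApplyStep (pvSet2 bd i j (pvBFin ages g)) =
          pvSet2 bdD i j (pvBFin ages g + pvHalfSum (pvDead ages g)) := by
        rw [List.foldl_append, pvApply_set2_comm dead _ i j _ hdij, ← hbdD, hE]
        rw [pvApply_cell _ _ i j (by rw [pvSet2_length]; exact hiD)
          (by rw [pvSet2_row_length]; exact hjD)]
        rw [pvGet2_set2_same _ _ _ _ hiD hjD, pvSet2_set2_same]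
      have hErest : ∀ t ∈ dead ++ E, pvCoord t ∉ rest := by
        intro t ht
        rcases List.mem_append.mp ht with h | h
        · exact hdrest t h
        · obtain ⟨a, _, rfl⟩ := List.mem_map.mp (hE ▸ h)
          simp only [pvCoord, List.getD]
          intro hmem
          exact (h1 (i, j) (by simpa using hmem)) rfl
      have := ih (pvSetCell tiA i j (pvPop (pvUpd ages g) (pvUpd ages g).length))
        (pvSetCell tiB i j (pvSurv ages g)) (pvSet2 bd i j (pvBFin ages g)) (dead ++ E) h2
        (fun q hq => by
          have hq' := hr q (List.mem_cons_of_mem _ hq)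
          have hne : (i, j) ≠ q := h1 q hq
          refine ⟨by rw [pvSet2_length]; exact hq'.1,
            by rw [pvSet2_row_length]; exact hq'.2.1, ?_⟩
          rw [pvGetCell_setCell_ne _ _ _ _ _ _ hne, pvGetCell_setCell_ne _ _ _ _ _ _ hne]
          exact hq'.2.2)
        hErest
      rw [this, happly]

def pvPairs (n : Nat) : List (Nat × Nat) :=
  (List.range n).flatMap fun i => (List.range n).map (Prod.mk i)

theorem pvFoldlNested {σ : Type} (l₁ l₂ : List Nat) (F : σ → Nat → Nat → σ) :
    ∀ (init : σ),
      (l₁.flatMap fun i => l₂.map (Prod.mk i)).foldl (fun s p => F s p.1 p.2) init =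
        l₁.foldl (fun s i => l₂.foldl (fun s j => F s i j) s) init := by
  induction l₁ with
  | nil => intro init; rfl
  | cons a r ih => intro init; simp [List.foldl_append, List.foldl_map, ih]

theorem pvPairs_nodup (n : Nat) : (pvPairs n).Nodup := by
  have := List.Nodup.product (List.nodup_range (n := n)) (List.nodup_range (n := n))
  simpa [pvPairs, List.product] using this

theorem pvPairs_mem (n : Nat) (p : Nat × Nat) : p ∈ pvPairs n ↔ p.1 < n ∧ p.2 < n := by
  obtain ⟨i, j⟩ := p
  simp [pvPairs, List.mem_range]

theorem pvFinal (N : Int) (ti : List (List (List Int))) (bd : List (List Int))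
    (hti : N.toNat ≤ ti.length) (hbd : N.toNat ≤ bd.length)
    (hbdr : ∀ r ∈ bd.take N.toNat, N.toNat ≤ r.length) :
    spring_summer N ti bd = spring_summer_alt N ti bd := by
  unfold spring_summer spring_summer_alt
  rw [← pvFoldlNested (List.range N.toNat) (List.range N.toNat) pvACellStep,
      ← pvFoldlNested (List.range N.toNat) (List.range N.toNat) pvBCellStep]
  have h := pvMain (pvPairs N.toNat) ti ti bd []
    (pvPairs_nodup N.toNat)
    (fun p hp => by
      obtain ⟨hpi, hpj⟩ := (pvPairs_mem _ p).mp hp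
      have hil : p.1 < bd.length := lt_of_lt_of_le hpi hbd
      refine ⟨hil, ?_, rfl⟩
      have hget : bd.getD p.1 [] = bd[p.1] := by
        simp [List.getD_eq_getElem?_getD, hil]
      have hmem : bd[p.1] ∈ bd.take N.toNat := by
        have hlt : p.1 < (bd.take N.toNat).length := by
          simp [List.length_take]; omega
        have : (bd.take N.toNat)[p.1] = bd[p.1] := List.getElem_take
        rw [← this]
        exact List.getElem_mem hlt
      have := hbdr _ hmem
      rw [hget]; omega)
    (by intro t ht; simp at ht)
  simpa using h

-- ===== VERDICT (by name: the statement is the Claim_ definition above) =====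
theorem spring_summer_spec : Claim_equal_spring_summer := by
  intro N ti bd _ hPre
  unfold Spec_spring_summer
  exact pvFinal N ti bd hPre.1 hPre.2.1 hPre.2.2.2
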